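-- pv_equiv track=rewrite | github.com/SuyuanLiu/Algorithm | Google高频题/generateBalancedString.py | dfs
-- ===== SOURCE A (Python) =====
-- def dfs(path, n):
--     res = []
--     for s in path:
--         if len(s) > 1 and s[-1] == s[-2]:
--             res.append(s + str(int(s[-1]) ^ 1))
--         else:
--             res.append(s + '0')
--             res.append(s + '1')
--
--     if n == 1:
--         return res
--     else:
--         return dfs(res, n-1)
-- ===== SOURCE B (Python) =====
-- def dfs(path, n):
--     # DFS re-decomposition: per-string recursive extension instead of A's level-by-level BFS.
--     def extend(s, k):
--         if k == 0:
--             return [s]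
--         if len(s) > 1 and s[-1] == s[-2]:
--             return extend(s + str(int(s[-1]) ^ 1), k - 1)
--         return extend(s + '0', k - 1) + extend(s + '1', k - 1)
--     out = []
--     for s in path:
--         out += extend(s, n)
--     return out
-- ===== Notes on version B (the rewrite author's own statement) =====
-- stated objective: alternative
-- what changed: Replaces A's level-by-level BFS (rebuilding the whole list of partial strings n times via list-valued recursion on n) with a per-string depth-first recursive generator extend(s,k) that completes one string at a time; DFS leaf order equals A's BFS level order, so the output is byte-identical.
import Mathlib
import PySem

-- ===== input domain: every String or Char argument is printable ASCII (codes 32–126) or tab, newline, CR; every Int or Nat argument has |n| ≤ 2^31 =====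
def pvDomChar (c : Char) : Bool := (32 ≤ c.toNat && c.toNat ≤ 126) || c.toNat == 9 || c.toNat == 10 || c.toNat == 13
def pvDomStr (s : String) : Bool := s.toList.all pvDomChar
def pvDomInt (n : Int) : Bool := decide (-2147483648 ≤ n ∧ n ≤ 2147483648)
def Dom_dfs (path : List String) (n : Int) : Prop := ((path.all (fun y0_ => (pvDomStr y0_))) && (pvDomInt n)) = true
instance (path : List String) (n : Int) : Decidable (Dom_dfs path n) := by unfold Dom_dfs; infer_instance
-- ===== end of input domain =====

-- B replaces A's level-by-level BFS recursion on n with a per-string depth-first generator; output is identical (alternative decomposition, no speed claim).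

-- ===== PORT A =====
-- shared sub-expression of both Pythons: 'len(s) > 1 and s[-1] == s[-2]'
def twoEq (s : String) : Bool :=
  decide (s.toList.length > 1) && (PySem.Str.pyGet? s (-1) == PySem.Str.pyGet? s (-2))

-- shared sub-expression of both Pythons: s + str(int(s[-1]) ^ 1); '.getD 0' is unreachable under Pre_dfs (int() would raise)
def flipApp (s : String) : String :=
  s ++ PySem.Int.toStr
    (PySem.Int.bxor (((PySem.Str.pyGet? s (-1)).bind (fun c => PySem.Int.ofChars? [c])).getD 0) 1)

-- the body of A's 'for s in path' loop: what gets appended to res for one s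
def dfsStep (s : String) : List String :=
  if twoEq s then [flipApp s] else [s ++ "0", s ++ "1"]

-- A's loop building res
def dfsLoop (path : List String) : List String :=
  path.foldl (fun res s => res ++ dfsStep s) []

-- A: recursion on n; the guard 'n ≤ 1' (for Python's 'n == 1') is a totality guard only:
-- Python A diverges for n < 1, and Pre_dfs requires 1 ≤ n.
def dfs (path : List String) (n : Int) : List String :=
  let res := dfsLoop path
  if n ≤ 1 then res else dfs res (n - 1)
termination_by n.toNat
decreasing_by simp_wf; omega

-- ===== PORT B =====
-- B's inner recursive generator extend(s, k) (k counted as a Nat: Python's k reaches exactly 0 when called with k = n ≥ 1)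
def extendStr (s : String) (k : Nat) : List String :=
  match k with
  | 0 => [s]
  | Nat.succ k =>
    if twoEq s then extendStr (flipApp s) k
    else extendStr (s ++ "0") k ++ extendStr (s ++ "1") k

def dfs_alt (path : List String) (n : Int) : List String :=
  path.foldl (fun out s => out ++ extendStr s n.toNat) []

-- ===== PRECONDITION & SPEC =====
-- Pre_dfs = exactly where Python A returns: n ≥ 1 (A recurses forever for n < 1), and every input
-- string whose last two characters are equal must end in a decimal digit (otherwise int(s[-1]) raises
-- ValueError; strings produced by later levels always end in a digit, so only the input needs this).
def Pre_dfs (path : List String) (n : Int) : Prop :=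
  1 ≤ n ∧ (path.all (fun s =>
    match s.toList.getLast?, s.toList.dropLast.getLast? with
    | some c, some d => (c != d) || c.isDigit
    | _, _ => true)) = true

instance (path : List String) (n : Int) : Decidable (Pre_dfs path n) := by
  unfold Pre_dfs; infer_instance

def pvWitness_dfs : List String × Int := (["0", "a1", "77"], 3)

def Spec_dfs (path : List String) (n : Int) (out : List String) : Prop := out = dfs_alt path n
instance (path : List String) (n : Int) (out : List String) : Decidable (Spec_dfs path n out) := by unfold Spec_dfs; infer_instance

-- ===== CLAIM (what is proved, stated in full; the proofs are below) =====
def Claim_equal_dfs : Prop := ∀ (path : List String) (n : Int), Dom_dfs path n → Pre_dfs path n → Spec_dfs path n (dfs path n)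

-- ===== LEMMAS AND PROOFS =====
theorem dfsLoop_eq_flatMap (path : List String) : dfsLoop path = path.flatMap dfsStep := by
  unfold dfsLoop
  rw [PySem.List.foldl_append_eq_flatMap, List.nil_append]

theorem dfs_alt_eq_flatMap (path : List String) (n : Int) :
    dfs_alt path n = path.flatMap (fun s => extendStr s n.toNat) := by
  unfold dfs_alt
  rw [PySem.List.foldl_append_eq_flatMap, List.nil_append]

theorem extendStr_succ (s : String) (k : Nat) :
    extendStr s (k + 1) = (dfsStep s).flatMap (fun t => extendStr t k) := by
  rw [extendStr, dfsStep]
  split_ifs <;> simp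

theorem extendStr_one (s : String) : extendStr s 1 = dfsStep s := by
  rw [extendStr_succ]
  simp [extendStr]

theorem dfs_eq_flatMap_extend (k : Nat) (path : List String) :
    dfs path ((k : Int) + 1) = path.flatMap (fun s => extendStr s (k + 1)) := by
  induction k generalizing path with
  | zero =>
    rw [dfs]
    simp [dfsLoop_eq_flatMap, extendStr_one]
  | succ k ih =>
    rw [dfs]
    have hgt : ¬ (((k + 1 : Nat) : Int) + 1 ≤ 1) := by push_cast; omega
    rw [if_neg hgt]
    have harg : ((k + 1 : Nat) : Int) + 1 - 1 = (k : Int) + 1 := by push_cast; ring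
    rw [harg, ih, dfsLoop_eq_flatMap, List.flatMap_assoc]
    refine List.flatMap_congr ?_
    intro s _
    rw [extendStr_succ]

-- ===== VERDICT (by name: the statement is the Claim_ definition above) =====
theorem dfs_spec : Claim_equal_dfs := by
  intro path n _ hpre
  obtain ⟨hn, -⟩ := hpre
  unfold Spec_dfs
  have hk : n = ((n.toNat - 1 : Nat) : Int) + 1 := by omega
  have hk2 : n.toNat = (n.toNat - 1) + 1 := by omega
  rw [dfs_alt_eq_flatMap, hk, dfs_eq_flatMap_extend]
  rw [hk2]
  simp
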